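-- pv_equiv track=rewrite | github.com/FluffyFu/Leetcode | 1216_valid_palindrome_3/solution.py | back_track
-- ===== SOURCE A (Python) =====
-- def back_track(s, k):
--     """
--     TLE
--     """
--     if k < 0:
--         return False
--     if is_palindrom(s):
--         return True
--
--     for i in range(len(s)):
--         if back_track(s[:i] + s[i+1:], k-1):
--             return True
--
--     return False
--
-- def is_palindrom(s):
--     if not s:
--         return True
--     l, h = 0, len(s) - 1
--
--     while l < h:
--         if s[l] != s[h]:
--             return False
--         l += 1
--         h -= 1
--     return True
-- ===== SOURCE B (Python) =====
-- def back_track(s, k):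
--     """O(n^2) DP: s can become a palindrome with at most k deletions
--     iff len(s) - longest_palindromic_subsequence(s) <= k."""
--     n = len(s)
--     memo = {}
--
--     def lps(l, r):
--         if l > r:
--             return 0
--         if l == r:
--             return 1
--         key = (l, r)
--         if key in memo:
--             return memo[key]
--         if s[l] == s[r]:
--             res = 2 + lps(l + 1, r - 1)
--         else:
--             res = max(lps(l + 1, r), lps(l, r - 1))
--         memo[key] = res
--         return res
--
--     return n - lps(0, n - 1) <= k
-- ===== Notes on version B (the rewrite author's own statement) =====
-- stated objective: alternative
-- what changed: A's backtracking search (try deleting every character, recurse with k-1) is replaced by the memoized interval DP for the longest palindromic subsequence: the answer is len(s) - LPS(s) <= k.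
import Mathlib
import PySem

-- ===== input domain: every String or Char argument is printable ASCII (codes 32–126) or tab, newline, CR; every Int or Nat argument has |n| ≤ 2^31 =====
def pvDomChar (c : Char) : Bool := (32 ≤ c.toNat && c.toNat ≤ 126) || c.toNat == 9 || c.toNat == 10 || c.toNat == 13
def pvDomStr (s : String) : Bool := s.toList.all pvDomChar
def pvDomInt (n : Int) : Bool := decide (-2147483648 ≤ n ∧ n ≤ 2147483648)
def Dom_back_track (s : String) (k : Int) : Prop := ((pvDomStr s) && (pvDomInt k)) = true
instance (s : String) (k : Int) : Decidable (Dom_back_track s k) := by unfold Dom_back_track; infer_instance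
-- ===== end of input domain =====

-- B replaces A's delete-one-char backtracking search by the memoized interval DP
-- "len(s) - longestPalindromicSubsequence(s) <= k" (objective: alternative).

-- ===== PORT A =====
-- port of is_palindrom's while loop (two pointers l, h)
def isPalAux (cs : List Char) (l h : Int) : Bool :=
  if l < h then
    if PySem.List.pyGet? cs l ≠ PySem.List.pyGet? cs h then false
    else isPalAux cs (l + 1) (h - 1)
  else true
termination_by (h - l).toNat
decreasing_by omega

def is_palindrom (cs : List Char) : Bool :=
  if cs = [] then true else isPalAux cs 0 ((cs.length : Int) - 1)

def btAux (cs : List Char) (k : Int) : Bool :=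
  if k < 0 then false
  else if is_palindrom cs then true
  else (List.range cs.length).attach.any fun ⟨i, hi⟩ =>
    btAux (PySem.List.slice cs none (some (i : Int)) ++ PySem.List.slice cs (some ((i : Int) + 1)) none) (k - 1)
termination_by cs.length
decreasing_by
  simp only [List.mem_range] at hi
  rw [PySem.List.slice_to_natCast]
  have h1 : ((i : Int) + 1) = ((i + 1 : Nat) : Int) := by push_cast; ring
  rw [h1, PySem.List.slice_from_natCast]
  simp only [List.length_append, List.length_take, List.length_drop]
  omega

def back_track (s : String) (k : Int) : Bool := btAux s.toList k

-- ===== PORT B =====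
-- port of B's lps(l, r) recurrence (the Python memo dict only caches values of
-- this same recursion; the recursion itself is ported step for step)
def lpsB (cs : List Char) (l r : Int) : Int :=
  if l > r then 0
  else if l = r then 1
  else if PySem.List.pyGet? cs l = PySem.List.pyGet? cs r then 2 + lpsB cs (l + 1) (r - 1)
  else max (lpsB cs (l + 1) r) (lpsB cs l (r - 1))
termination_by (r - l).toNat
decreasing_by all_goals omega

def back_track_alt (s : String) (k : Int) : Bool :=
  decide ((s.toList.length : Int) - lpsB s.toList 0 ((s.toList.length : Int) - 1) ≤ k)

-- ===== PRECONDITION & SPEC =====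
def Spec_back_track (s : String) (k : Int) (out : Bool) : Prop := out = back_track_alt s k
instance (s : String) (k : Int) (out : Bool) : Decidable (Spec_back_track s k out) := by unfold Spec_back_track; infer_instance

-- ===== CLAIM (what is proved, stated in full; the proofs are below) =====
def Claim_equal_back_track : Prop := ∀ (s : String) (k : Int), Dom_back_track s k → Spec_back_track s k (back_track s k)

-- ===== LEMMAS AND PROOFS =====

-- "s can reach a palindrome with at most k deletions": there is a palindromic
-- subsequence t with length ≥ len s - k
def Good (cs : List Char) (k : Int) : Prop :=
  ∃ t : List Char, t.reverse = t ∧ t.Sublist cs ∧ (cs.length : Int) ≤ (t.length : Int) + k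

-- the segment cs[l..r] (inclusive), Int bounds
def pvSeg (cs : List Char) (l r : Int) : List Char :=
  (cs.drop l.toNat).take (r + 1 - l).toNat

theorem pal_wrap (a b : Char) (t : List Char) :
    ((a :: (t ++ [b])).reverse = a :: (t ++ [b])) ↔ (b = a ∧ t.reverse = t) := by
  rw [List.reverse_cons, List.reverse_append, List.reverse_singleton]
  simp only [List.cons_append, List.cons.injEq]
  constructor
  · rintro ⟨rfl, h2⟩
    exact ⟨rfl, by simpa using h2⟩
  · rintro ⟨rfl, h2⟩
    simp [h2]

theorem pal_decomp (t : List Char) (hp : t.reverse = t) (hl : 2 ≤ t.length) :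
    ∃ a u, t = a :: (u ++ [a]) ∧ u.reverse = u := by
  match t, hp, hl with
  | a :: t₁, hp, hl2 =>
    have ht₁ : t₁ ≠ [] := by rintro rfl; simp at hl2
    have hd : t₁ = t₁.dropLast ++ [t₁.getLast ht₁] := (List.dropLast_append_getLast ht₁).symm
    have hp' : (a :: (t₁.dropLast ++ [t₁.getLast ht₁])).reverse
        = a :: (t₁.dropLast ++ [t₁.getLast ht₁]) := by rw [← hd]; exact hp
    obtain ⟨hba, hu⟩ := (pal_wrap _ _ _).mp hp'
    refine ⟨a, t₁.dropLast, ?_, hu⟩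
    rw [hba] at hd
    exact congrArg (a :: ·) hd

theorem sub_snoc {α : Type} (t ys : List α) (b : α) (h : t.Sublist (ys ++ [b])) :
    t.Sublist ys ∨ ∃ t', t = t' ++ [b] ∧ t'.Sublist ys := by
  have h' : t.reverse.Sublist (b :: ys.reverse) := by simpa using h.reverse
  rcases List.sublist_cons_iff.mp h' with h2 | ⟨t', ht', h2⟩
  · left; simpa using h2.reverse
  · right
    refine ⟨t'.reverse, ?_, by simpa using h2.reverse⟩
    have := congrArg List.reverse ht'
    simpa using this

theorem exch (a : Char) (t xs : List Char) (hp : t.reverse = t)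
    (hs : t.Sublist (a :: (xs ++ [a]))) :
    ∃ u : List Char, u.reverse = u ∧ u.Sublist xs ∧ t.length ≤ u.length + 2 := by
  by_cases hlen : t.length ≤ 2
  · exact ⟨[], rfl, List.nil_sublist xs, by simpa using hlen⟩
  obtain ⟨c, u, rfl, hu⟩ := pal_decomp t hp (by omega)
  have hshape : c :: (u ++ [c]) = (c :: u) ++ [c] := by simp
  refine ⟨u, hu, ?_, by simp⟩
  rcases List.sublist_cons_iff.mp hs with h | ⟨t', ht', h⟩
  · -- c :: (u ++ [c]) <+ xs ++ [a]
    rcases sub_snoc _ _ _ h with h2 | ⟨t'', ht'', h2⟩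
    · have hu2 : u.Sublist (c :: (u ++ [c])) :=
        (u.sublist_append_left [c]).trans (List.sublist_cons_self c _)
      exact hu2.trans h2
    · have hdt : t'' = c :: u := by
        have h4 := congrArg List.dropLast ht''
        rw [hshape, List.dropLast_concat, List.dropLast_concat] at h4
        exact h4.symm
      rw [hdt] at h2
      exact (List.sublist_cons_self c u).trans h2
  · -- a :: t' = c :: (u ++ [c]), t' <+ xs ++ [a]
    have hca : c = a := by
      have h3 := congrArg List.head? ht'
      simpa using h3
    subst hca
    have ht'2 : t' = u ++ [c] := by
      have h3 := congrArg List.tail ht'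
      simpa using h3.symm
    subst ht'2
    rcases sub_snoc _ _ _ h with h2 | ⟨t'', ht'', h2⟩
    · exact (u.sublist_append_left [c]).trans h2
    · have hdt : t'' = u := by
        have h4 := congrArg List.dropLast ht''
        rw [List.dropLast_concat, List.dropLast_concat] at h4
        exact h4.symm
      rw [hdt] at h2
      exact h2

theorem case_ne (a b : Char) (t xs : List Char) (hp : t.reverse = t)
    (hs : t.Sublist (a :: (xs ++ [b]))) (hne : a ≠ b) :
    t.Sublist (xs ++ [b]) ∨ t.Sublist (a :: xs) := by
  rcases List.sublist_cons_iff.mp hs with h | ⟨t', rfl, h⟩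
  · exact Or.inl h
  rcases sub_snoc _ _ _ h with h2 | ⟨t'', rfl, h2⟩
  · exact Or.inr (h2.cons₂ a)
  -- t = a :: (t'' ++ [b]), palindrome → b = a, contradiction
  obtain ⟨hba, _⟩ := (pal_wrap a b t'').mp hp
  exact absurd hba.symm hne

theorem erase_of_sublist {α : Type} (t cs : List α) (h : t.Sublist cs)
    (hl : t.length < cs.length) : ∃ i < cs.length, t.Sublist (cs.eraseIdx i) := by
  induction h with
  | slnil => simp at hl
  | cons a h ih =>
    exact ⟨0, by simp, by simpa using h⟩
  | cons₂ a h ih =>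
    obtain ⟨i, hi, hs⟩ := ih (by simpa using hl)
    exact ⟨i + 1, by simpa using hi, by simpa using hs.cons₂ a⟩

theorem seg_empty (cs : List Char) (l r : Int) (h : r < l) : pvSeg cs l r = [] := by
  unfold pvSeg
  have : (r + 1 - l).toNat = 0 := by omega
  simp [this]

theorem seg_consL (cs : List Char) (l r : Int) (hl : 0 ≤ l) (hlr : l ≤ r)
    (hr : r < cs.length) (hlt : l.toNat < cs.length) :
    pvSeg cs l r = cs[l.toNat] :: pvSeg cs (l + 1) r := by
  unfold pvSeg
  rw [List.drop_eq_getElem_cons hlt]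
  have h1 : (r + 1 - l).toNat = (r + 1 - (l + 1)).toNat + 1 := by omega
  have h2 : (l + 1).toNat = l.toNat + 1 := by omega
  rw [h1, h2, List.take_succ_cons]

theorem seg_snocR (cs : List Char) (l r : Int) (hl : 0 ≤ l) (hlr : l ≤ r)
    (hr : r < cs.length) (hrt : r.toNat < cs.length) :
    pvSeg cs l r = pvSeg cs l (r - 1) ++ [cs[r.toNat]] := by
  unfold pvSeg
  have h1 : (r + 1 - l).toNat = (r - 1 + 1 - l).toNat + 1 := by omega
  rw [h1, List.take_add_one]
  have h2 : l.toNat + (r - 1 + 1 - l).toNat = r.toNat := by omega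
  have h3 : (cs.drop l.toNat)[(r - 1 + 1 - l).toNat]? = some cs[r.toNat] := by
    rw [List.getElem?_drop, h2, List.getElem?_eq_getElem hrt]
  rw [h3]
  rfl

theorem seg_full (cs : List Char) : pvSeg cs 0 ((cs.length : Int) - 1) = cs := by
  unfold pvSeg
  simp

theorem isPalAux_iff (cs : List Char) (l h : Int) (hl : 0 ≤ l) (hh : h < cs.length) :
    isPalAux cs l h = true ↔ (pvSeg cs l h).reverse = pvSeg cs l h := by
  by_cases hlh : l < h
  · have hlt : l.toNat < cs.length := by omega
    have hrt : h.toNat < cs.length := by omega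
    have hga : PySem.List.pyGet? cs l = some cs[l.toNat] :=
      PySem.List.pyGet?_eq_some_getElem cs hl (by omega)
    have hgb : PySem.List.pyGet? cs h = some cs[h.toNat] :=
      PySem.List.pyGet?_eq_some_getElem cs (by omega) (by omega)
    have hdec : pvSeg cs l h = cs[l.toNat] :: (pvSeg cs (l + 1) (h - 1) ++ [cs[h.toNat]]) := by
      rw [seg_consL cs l h hl (by omega) hh hlt,
          seg_snocR cs (l + 1) h (by omega) (by omega) hh hrt]
    rw [isPalAux, if_pos hlh, hga, hgb, hdec, pal_wrap]
    by_cases hab : cs[l.toNat] = cs[h.toNat]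
    · rw [if_neg (by simp [hab]),
          isPalAux_iff cs (l + 1) (h - 1) (by omega) (by omega)]
      constructor
      · exact fun hm => ⟨hab.symm, hm⟩
      · exact fun hm => hm.2
    · rw [if_pos (by simp [hab])]
      constructor
      · intro hfalse; exact absurd hfalse (by simp)
      · intro hm; exact absurd hm.1.symm hab
  · rw [isPalAux, if_neg hlh]
    by_cases hhe : h < l
    · rw [seg_empty cs l h hhe]; simp
    · have hle : l = h := by omega
      subst hle
      rw [seg_consL cs l l hl le_rfl hh (by omega), seg_empty cs (l + 1) l (by omega)]
      simp
termination_by (h - l).toNat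
decreasing_by omega

theorem is_palindrom_iff (cs : List Char) :
    is_palindrom cs = true ↔ cs.reverse = cs := by
  unfold is_palindrom
  by_cases hcs : cs = []
  · subst hcs; simp
  · rw [if_neg hcs, isPalAux_iff cs 0 ((cs.length : Int) - 1) le_rfl (by omega), seg_full]

theorem lpsB_spec (cs : List Char) (l r : Int) (hl : 0 ≤ l) (hr : r < cs.length) :
    (∃ t : List Char, t.reverse = t ∧ t.Sublist (pvSeg cs l r) ∧ (t.length : Int) = lpsB cs l r) ∧
    (∀ t : List Char, t.reverse = t → t.Sublist (pvSeg cs l r) → (t.length : Int) ≤ lpsB cs l r) := by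
  by_cases hgt : l > r
  · rw [lpsB, if_pos hgt, seg_empty cs l r hgt]
    refine ⟨⟨[], rfl, List.nil_sublist _, by simp⟩, ?_⟩
    intro t _ ht
    rw [List.sublist_nil.mp ht]; simp
  by_cases heq : l = r
  · subst heq
    have hlt : l.toNat < cs.length := by omega
    rw [lpsB, if_neg hgt, if_pos rfl,
        seg_consL cs l l hl le_rfl hr hlt, seg_empty cs (l + 1) l (by omega)]
    refine ⟨⟨[cs[l.toNat]], by simp, List.Sublist.refl _, by simp⟩, ?_⟩
    intro t _ ht
    have := ht.length_le
    simp at this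
    omega
  -- l < r
  have hlr : l < r := by omega
  have hlt : l.toNat < cs.length := by omega
  have hrt : r.toNat < cs.length := by omega
  have hga : PySem.List.pyGet? cs l = some cs[l.toNat] :=
    PySem.List.pyGet?_eq_some_getElem cs hl (by omega)
  have hgb : PySem.List.pyGet? cs r = some cs[r.toNat] :=
    PySem.List.pyGet?_eq_some_getElem cs (by omega) (by omega)
  have hdec : pvSeg cs l r = cs[l.toNat] :: (pvSeg cs (l + 1) (r - 1) ++ [cs[r.toNat]]) := by
    rw [seg_consL cs l r hl (by omega) hr hlt,
        seg_snocR cs (l + 1) r (by omega) (by omega) hr hrt]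
  have hsegA : pvSeg cs (l + 1) r = pvSeg cs (l + 1) (r - 1) ++ [cs[r.toNat]] :=
    seg_snocR cs (l + 1) r (by omega) (by omega) hr hrt
  have hsegB : pvSeg cs l (r - 1) = cs[l.toNat] :: pvSeg cs (l + 1) (r - 1) :=
    seg_consL cs l (r - 1) hl (by omega) (by omega) hlt
  rw [lpsB, if_neg hgt, if_neg heq, hga, hgb, hdec]
  by_cases hab : cs[l.toNat] = cs[r.toNat]
  · rw [if_pos (by simp [hab])]
    obtain ⟨⟨u, hu, hus, hul⟩, hbound⟩ := lpsB_spec cs (l + 1) (r - 1) (by omega) (by omega)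
    constructor
    · refine ⟨cs[l.toNat] :: (u ++ [cs[l.toNat]]), (pal_wrap _ _ _).mpr ⟨rfl, hu⟩, ?_, ?_⟩
      · rw [← hab]
        exact ((hus.append_right [cs[l.toNat]]).cons₂ _)
      · simp only [List.length_cons, List.length_append, List.length_nil]
        push_cast
        omega
    · intro t hp hts
      rw [← hab] at hts
      obtain ⟨u', hu', hu's, hu'l⟩ := exch cs[l.toNat] t (pvSeg cs (l + 1) (r - 1)) hp hts
      have := hbound u' hu' hu's
      push_cast at *
      omega
  · rw [if_neg (by simp [hab])]
    obtain ⟨⟨u1, hu1, hu1s, hu1l⟩, hbound1⟩ := lpsB_spec cs (l + 1) r (by omega) hr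
    obtain ⟨⟨u2, hu2, hu2s, hu2l⟩, hbound2⟩ := lpsB_spec cs l (r - 1) (by omega) (by omega)
    rw [hsegA] at hu1s hbound1
    rw [hsegB] at hu2s hbound2
    constructor
    · rcases le_total (lpsB cs (l + 1) r) (lpsB cs l (r - 1)) with hm | hm
      · refine ⟨u2, hu2, ?_, ?_⟩
        · exact hu2s.trans (((pvSeg cs (l + 1) (r - 1)).sublist_append_left [cs[r.toNat]]).cons₂ _)
        · rw [hu2l, max_eq_right hm]
      · refine ⟨u1, hu1, hu1s.trans (List.sublist_cons_self _ _), ?_⟩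
        rw [hu1l, max_eq_left hm]
    · intro t hp hts
      rcases case_ne cs[l.toNat] cs[r.toNat] t (pvSeg cs (l + 1) (r - 1)) hp hts hab with h | h
      · exact le_max_of_le_left (hbound1 t hp h)
      · exact le_max_of_le_right (hbound2 t hp h)
termination_by (r - l).toNat
decreasing_by all_goals omega

theorem slice_del (cs : List Char) (i : Nat) :
    PySem.List.slice cs none (some (i : Int)) ++ PySem.List.slice cs (some ((i : Int) + 1)) none
      = cs.eraseIdx i := by
  rw [PySem.List.slice_to_natCast]
  have h1 : ((i : Int) + 1) = ((i + 1 : Nat) : Int) := by push_cast; ring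
  rw [h1, PySem.List.slice_from_natCast, List.eraseIdx_eq_take_drop_succ]

theorem btAux_good (n : Nat) : ∀ cs : List Char, cs.length = n → ∀ k : Int,
    (btAux cs k = true ↔ Good cs k) := by
  induction n using Nat.strong_induction_on with
  | _ n IH =>
  intro cs hn k
  rw [btAux]
  split_ifs with hk hpal
  · constructor
    · intro h; exact absurd h (by simp)
    · rintro ⟨t, _, hsub, hlen⟩
      have := hsub.length_le
      exfalso
      omega
  · constructor
    · intro _
      exact ⟨cs, (is_palindrom_iff cs).mp hpal, List.Sublist.refl _, by omega⟩
    · intro _; rfl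
  · have hne : cs ≠ [] := by
      rintro rfl
      exact hpal (by unfold is_palindrom; simp)
    have hn0 : 0 < n := by
      cases cs with
      | nil => exact absurd rfl hne
      | cons a t => simp at hn; omega
    rw [List.any_eq_true]
    constructor
    · rintro ⟨⟨i, hi⟩, _, hb⟩
      simp only [List.mem_range] at hi
      dsimp only at hb
      rw [slice_del cs i] at hb
      have hlen2 : (cs.eraseIdx i).length = n - 1 := by
        rw [List.length_eraseIdx, if_pos hi, hn]
      obtain ⟨t, hp, hs, hl⟩ := (IH (n - 1) (by omega) (cs.eraseIdx i) hlen2 (k - 1)).mp hb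
      refine ⟨t, hp, hs.trans (cs.eraseIdx_sublist i), ?_⟩
      rw [hlen2] at hl
      have : cs.length = n := hn
      omega
    · rintro ⟨t, hp, hs, hl⟩
      have hnec : t ≠ cs := by
        rintro rfl
        exact hpal ((is_palindrom_iff t).mpr hp)
      have hlt : t.length < cs.length :=
        lt_of_le_of_ne hs.length_le (fun he => hnec (hs.eq_of_length he))
      obtain ⟨i, hi, hsi⟩ := erase_of_sublist t cs hs hlt
      refine ⟨⟨i, List.mem_range.mpr hi⟩, List.mem_attach _ _, ?_⟩
      dsimp only
      rw [slice_del cs i]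
      have hlen2 : (cs.eraseIdx i).length = n - 1 := by
        rw [List.length_eraseIdx, if_pos hi, hn]
      apply (IH (n - 1) (by omega) (cs.eraseIdx i) hlen2 (k - 1)).mpr
      refine ⟨t, hp, hsi, ?_⟩
      rw [hlen2]
      have : cs.length = n := hn
      omega

theorem alt_good (s : String) (k : Int) : back_track_alt s k = true ↔ Good s.toList k := by
  unfold back_track_alt
  rw [decide_eq_true_iff]
  obtain ⟨⟨t0, hp0, hs0, hl0⟩, hbound⟩ :=
    lpsB_spec s.toList 0 ((s.toList.length : Int) - 1) le_rfl (by omega)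
  rw [seg_full] at hs0 hbound
  constructor
  · intro h
    exact ⟨t0, hp0, hs0, by omega⟩
  · rintro ⟨t, hp, hs, hl⟩
    have := hbound t hp hs
    omega

-- ===== VERDICT (by name: the statement is the Claim_ definition above) =====
theorem back_track_spec : Claim_equal_back_track := by
  intro s k _
  unfold Spec_back_track
  have hA : back_track s k = true ↔ Good s.toList k := btAux_good s.toList.length s.toList rfl k
  have hB := alt_good s k
  cases hcs : back_track_alt s k with
  | false =>
    cases h : back_track s k with
    | false => rfl
    | true => exact absurd (hB.mpr (hA.mp h)) (by simp [hcs])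
  | true => exact hA.mpr (hB.mp hcs)
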